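-- pv_equiv track=rewrite | github.com/kirschovapetra/B-PROG1 | 06 24.10/04 dalsie/06 konvergencia.py | gr
-- ===== SOURCE A (Python) =====
-- def gr(a,n,q):
--     G=[]
--     for i in range(n):
--         sum=0
--         for j in range(i+1):
--             sum+=a*q**j
--         G.append(sum)
--     return G
-- ===== SOURCE B (Python) =====
-- def gr(a, n, q):
--     # Running prefix sum: each partial sum and power term updated incrementally (O(n) vs A's O(n^2)).
--     G = []
--     s = 0
--     t = a
--     for _ in range(n):
--         s += t
--         G.append(s)
--         t *= q
--     return G
-- ===== Notes on version B (the rewrite author's own statement) =====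
-- stated objective: faster
-- what changed: Replaces the nested loop that recomputes each partial sum (with q**j powers) from scratch by a single pass maintaining a running sum and running power term.
import Mathlib
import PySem

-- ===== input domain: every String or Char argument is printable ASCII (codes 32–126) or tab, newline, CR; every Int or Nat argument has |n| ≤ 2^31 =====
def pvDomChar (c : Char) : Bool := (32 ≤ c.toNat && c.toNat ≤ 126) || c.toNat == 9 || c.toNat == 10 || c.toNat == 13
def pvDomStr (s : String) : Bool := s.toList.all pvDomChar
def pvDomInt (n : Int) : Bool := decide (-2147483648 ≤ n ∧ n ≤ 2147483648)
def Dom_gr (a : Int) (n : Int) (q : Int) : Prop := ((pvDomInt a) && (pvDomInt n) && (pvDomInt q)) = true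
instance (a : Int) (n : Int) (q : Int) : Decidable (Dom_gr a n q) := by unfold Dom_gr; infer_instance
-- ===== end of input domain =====

-- B replaces A's quadratic nested loop (each partial sum recomputed via q**j) by one
-- pass with a running sum and a running power term (objective: faster, asymptotic).

-- ===== PORT A =====
def gr (a : Int) (n : Int) (q : Int) : List Int :=
  (PySem.List.pyRange 0 n 1).foldl
    (fun G i =>
      G ++ [(PySem.List.pyRange 0 (i + 1) 1).foldl (fun sum j => sum + a * q ^ j.toNat) 0])
    []

-- ===== PORT B =====
-- one step per output element: s += t; append s; t *= q
def grGo (q : Int) : Nat → Int → Int → List Int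
  | 0, _, _ => []
  | Nat.succ k, s, t => (s + t) :: grGo q k (s + t) (t * q)

def gr_alt (a : Int) (n : Int) (q : Int) : List Int := grGo q n.toNat 0 a

-- ===== PRECONDITION & SPEC =====
def Spec_gr (a : Int) (n : Int) (q : Int) (out : List Int) : Prop := out = gr_alt a n q
instance (a : Int) (n : Int) (q : Int) (out : List Int) : Decidable (Spec_gr a n q out) := by unfold Spec_gr; infer_instance

-- ===== CLAIM (what is proved, stated in full; the proofs are below) =====
def Claim_equal_gr : Prop := ∀ (a : Int) (n : Int) (q : Int), Dom_gr a n q → Spec_gr a n q (gr a n q)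

-- ===== LEMMAS AND PROOFS =====

/-- reference value: sum of the first `k` terms of the geometric series. -/
def pre (a q : Int) (k : Nat) : Int := ∑ j ∈ Finset.range k, a * q ^ j

lemma foldl_append_singleton {α β : Type} (f : α → β) (xs : List α) (acc : List β) :
    xs.foldl (fun G i => G ++ [f i]) acc = acc ++ xs.map f := by
  induction xs generalizing acc with
  | nil => simp
  | cons x xs ih => simp [List.foldl_cons, ih]

lemma inner_eq_pre (a q : Int) (k : Nat) :
    (PySem.List.pyRange 0 (k : Int) 1).foldl (fun sum j => sum + a * q ^ j.toNat) 0
      = pre a q k := by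
  induction k with
  | zero => simp [PySem.List.pyRange_one_eq_nil, pre]
  | succ k ih =>
      have h : ((k : Int) + 1) = ((k + 1 : Nat) : Int) := by push_cast; ring
      rw [show ((k + 1 : Nat) : Int) = (k : Int) + 1 by push_cast; ring,
        PySem.List.pyRange_one_succ_right (by positivity)]
      simp [List.foldl_append, ih, pre, Finset.sum_range_succ]

lemma grGo_eq_map (a q : Int) (k m : Nat) :
    grGo q k (pre a q m) (a * q ^ m) = (List.range k).map (fun j => pre a q (m + 1 + j)) := by
  induction k generalizing m with
  | zero => simp [grGo]
  | succ k ih =>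
      have hs : pre a q m + a * q ^ m = pre a q (m + 1) := by
        simp [pre, Finset.sum_range_succ]
      have ht : a * q ^ m * q = a * q ^ (m + 1) := by ring
      rw [grGo, hs, ht, ih (m + 1), List.range_succ_eq_map]
      simp [List.map_map, Function.comp]
      intro j _
      congr 1
      omega

lemma gr_eq_map (a n q : Int) :
    gr a n q = (List.range n.toNat).map (fun k => pre a q (k + 1)) := by
  unfold gr
  rw [foldl_append_singleton, PySem.List.pyRange_one]
  simp only [List.map_map, Int.sub_zero]
  refine List.map_congr_left ?_
  intro k _
  simp only [Function.comp]
  have h : (0 : Int) + (k : Int) + 1 = ((k + 1 : Nat) : Int) := by push_cast; ring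
  rw [h, inner_eq_pre]

lemma gr_alt_eq_map (a n q : Int) :
    gr_alt a n q = (List.range n.toNat).map (fun k => pre a q (k + 1)) := by
  unfold gr_alt
  have h0 : (0 : Int) = pre a q 0 := by simp [pre]
  have h1 : a = a * q ^ (0 : Nat) := by ring
  rw [h0]; nth_rewrite 2 [h1]
  rw [grGo_eq_map]
  refine List.map_congr_left ?_
  intro k _; simp [Nat.add_comm]

-- ===== VERDICT (by name: the statement is the Claim_ definition above) =====
theorem gr_spec : Claim_equal_gr := by
  intro a n q _
  unfold Spec_gr
  rw [gr_eq_map, gr_alt_eq_map]
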